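-- pv_equiv track=rewrite | github.com/itdove/devaiflow | devflow/jira/utils.py | get_field_with_alias
-- ===== SOURCE A (Python) =====
-- from typing import Union, List, Optional, Dict, TYPE_CHECKING
--
-- FIELD_NAME_ALIASES = {
--     "component/s": "components",
--     "affects_version/s": "affects_versions",
-- }
--
-- def get_field_with_alias(field_mappings: Dict, field_name: str) -> Optional[Dict]:
--     """Get field info from field_mappings, checking both the field name and its alias.
--
--     This function provides backward compatibility for JIRA field names that changed
--     between server and cloud versions:
--     - component/s → components
--     - affects_version/s → affects_versions
--
--     Args:
--         field_mappings: Dictionary of field mappings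
--         field_name: Field name to look up (can be old or new variant)
--
--     Returns:
--         Field info dictionary if found (checking both name and alias), None otherwise
--
--     Examples:
--         >>> field_mappings = {"component/s": {...}, "other": {...}}
--         >>> get_field_with_alias(field_mappings, "components")  # Returns field_mappings["component/s"]
--         >>> get_field_with_alias(field_mappings, "component/s")  # Returns field_mappings["component/s"]
--     """
--     # Try the field name directly first
--     if field_name in field_mappings:
--         return field_mappings[field_name]
--
--     # Try reverse lookup: check if field_name is an alias (new name) for an old name
--     for old_name, new_name in FIELD_NAME_ALIASES.items():
--         if field_name == new_name and old_name in field_mappings: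
--             return field_mappings[old_name]
--
--     # Try forward lookup: check if field_name is an old name with a new alias
--     alias = FIELD_NAME_ALIASES.get(field_name)
--     if alias and alias in field_mappings:
--         return field_mappings[alias]
--
--     return None
-- ===== SOURCE B (Python) =====
-- FIELD_NAME_ALIASES = {
--     "component/s": "components",
--     "affects_version/s": "affects_versions",
-- }
--
-- def get_field_with_alias(field_mappings, field_name):
--     # Canonicalize every name to its old (server) variant and make a single
--     # pass over the mapping's items: an exact key match returns immediately,
--     # while the first canonically-equivalent key is remembered as a fallback.
--     reverse = {new: old for old, new in FIELD_NAME_ALIASES.items()}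
--     canon = lambda name: reverse.get(name, name)
--     target = canon(field_name)
--     fallback = None
--     found = False
--     for key, value in field_mappings.items():
--         if key == field_name:
--             return value
--         if not found and canon(key) == target:
--             fallback = value
--             found = True
--     return fallback
-- ===== Notes on version B (the rewrite author's own statement) =====
-- stated objective: alternative
-- what changed: A does keyed dict lookups in three staged phases (direct hit, a loop over the alias table for the reverse direction, then a forward .get); B instead canonicalizes names to their old variant and makes one scan over the mapping's items, returning on an exact key and remembering the first canonically-equivalent key as a fallback.
import Mathlib
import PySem

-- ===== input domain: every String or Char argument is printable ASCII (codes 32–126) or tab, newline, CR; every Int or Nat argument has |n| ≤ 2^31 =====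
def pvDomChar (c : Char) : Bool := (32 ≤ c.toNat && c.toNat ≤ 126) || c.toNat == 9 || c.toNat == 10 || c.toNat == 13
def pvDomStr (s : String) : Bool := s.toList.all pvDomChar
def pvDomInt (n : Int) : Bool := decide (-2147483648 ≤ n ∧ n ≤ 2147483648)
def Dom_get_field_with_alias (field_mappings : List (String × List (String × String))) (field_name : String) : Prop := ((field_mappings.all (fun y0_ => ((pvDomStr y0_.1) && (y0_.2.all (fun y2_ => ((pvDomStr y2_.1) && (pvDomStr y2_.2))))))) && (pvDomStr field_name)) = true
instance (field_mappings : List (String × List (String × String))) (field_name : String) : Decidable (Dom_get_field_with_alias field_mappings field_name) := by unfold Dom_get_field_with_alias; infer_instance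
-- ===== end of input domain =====

-- B canonicalizes names to their old variant and makes ONE scan over the mapping's items
-- (exact key returns, first canonically-equivalent key is the fallback), replacing A's
-- three staged keyed lookups; objective: alternative, same cost on a dict, O(n) scan here.


-- ===== PORT A =====
def FIELD_NAME_ALIASES : PySem.Dict String String :=
  PySem.Dict.ofList [("component/s", "components"), ("affects_version/s", "affects_versions")]

-- the explicit 'for old_name, new_name in FIELD_NAME_ALIASES.items()' loop with early return
def pvAliasLoop (field_mappings : List (String × List (String × String))) (field_name : String) :
    List (String × String) → Option (List (String × String))
  | [] => none
  | (old_name, new_name) :: rest =>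
    if field_name == new_name && (PySem.Dict.mk field_mappings).contains old_name then
      (PySem.Dict.mk field_mappings).get? old_name
    else pvAliasLoop field_mappings field_name rest

def get_field_with_alias (field_mappings : List (String × List (String × String))) (field_name : String) : Option (List (String × String)) :=
  if (PySem.Dict.mk field_mappings).contains field_name then
    (PySem.Dict.mk field_mappings).get? field_name
  else
    match pvAliasLoop field_mappings field_name FIELD_NAME_ALIASES.items with
    | some v => some v
    | none =>
      match FIELD_NAME_ALIASES.get? field_name with
      | some al =>
        -- 'if alias and alias in field_mappings': truthiness of a string = nonempty
        if al ≠ "" ∧ (PySem.Dict.mk field_mappings).contains al then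
          (PySem.Dict.mk field_mappings).get? al
        else none
      | none => none

-- ===== PORT B =====
-- reverse = {new: old for old, new in FIELD_NAME_ALIASES.items()}
def pvReverse : PySem.Dict String String :=
  FIELD_NAME_ALIASES.items.foldl (fun d p => d.insert p.2 p.1) PySem.Dict.empty

-- canon = lambda name: reverse.get(name, name)
def pvCanon (name : String) : String := pvReverse.getD name name

-- 'for key, value in field_mappings.items(): …' with fallback/found accumulators
def pvScanLoop (field_name target : String) (fallback : Option (List (String × String))) (found : Bool) :
    List (String × List (String × String)) → Option (List (String × String))
  | [] => fallback
  | (key, value) :: rest =>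
    if key == field_name then some value
    else if !found && pvCanon key == target then pvScanLoop field_name target (some value) true rest
    else pvScanLoop field_name target fallback found rest

def get_field_with_alias_alt (field_mappings : List (String × List (String × String))) (field_name : String) : Option (List (String × String)) :=
  pvScanLoop field_name (pvCanon field_name) none false (PySem.Dict.mk field_mappings).items

-- ===== PRECONDITION & SPEC =====
def Spec_get_field_with_alias (field_mappings : List (String × List (String × String))) (field_name : String) (out : Option (List (String × String))) : Prop := out = get_field_with_alias_alt field_mappings field_name
instance (field_mappings : List (String × List (String × String))) (field_name : String) (out : Option (List (String × String))) : Decidable (Spec_get_field_with_alias field_mappings field_name out) := by unfold Spec_get_field_with_alias; infer_instance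

-- ===== CLAIM =====
def Claim_equal_get_field_with_alias : Prop := ∀ (field_mappings : List (String × List (String × String))) (field_name : String), Dom_get_field_with_alias field_mappings field_name → Spec_get_field_with_alias field_mappings field_name (get_field_with_alias field_mappings field_name)

-- ===== LEMMAS AND PROOFS =====

lemma pvCanon_eq (k : String) :
    pvCanon k = if k = "components" then "component/s"
                else if k = "affects_versions" then "affects_version/s" else k := by
  have e : pvReverse = PySem.Dict.mk
      [("components", "component/s"), ("affects_versions", "affects_version/s")] := by rfl
  by_cases h1 : k = "components"
  · subst h1; rfl
  by_cases h2 : k = "affects_versions"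
  · subst h2; rfl
  have b1 : ("components" == k) = false := beq_eq_false_iff_ne.mpr (Ne.symm h1)
  have b2 : ("affects_versions" == k) = false := beq_eq_false_iff_ne.mpr (Ne.symm h2)
  simp [pvCanon, e, PySem.Dict.getD_eq_get?_getD, b1, b2,
    PySem.Dict.get?, h1, h2]

-- once found, the fallback is frozen: only an exact hit can change the result
lemma pvScanLoop_found (fn target : String) (v : List (String × String))
    (l : List (String × List (String × String))) :
    pvScanLoop fn target (some v) true l =
      match (PySem.Dict.mk l).get? fn with
      | some w => some w
      | none => some v := by
  induction l with
  | nil => simp [pvScanLoop, PySem.Dict.get?]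
  | cons p rest ih =>
    obtain ⟨k, w⟩ := p
    by_cases hk : k = fn
    · subst hk; simp [pvScanLoop, PySem.Dict.get?_mk_cons]
    · have : (k == fn) = false := beq_eq_false_iff_ne.mpr hk
      simp [pvScanLoop, this, PySem.Dict.get?_mk_cons, ih]

-- the scan equals a direct lookup with a single fallback key 'other'
lemma pvScanLoop_eq (fn target other : String)
    (h : ∀ k, k ≠ fn → ((pvCanon k == target) = (k == other)))
    (l : List (String × List (String × String))) :
    pvScanLoop fn target none false l =
      match (PySem.Dict.mk l).get? fn with
      | some w => some w
      | none => (PySem.Dict.mk l).get? other := by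
  induction l with
  | nil => simp [pvScanLoop, PySem.Dict.get?]
  | cons p rest ih =>
    obtain ⟨k, w⟩ := p
    by_cases hk : k = fn
    · subst hk; simp [pvScanLoop, PySem.Dict.get?_mk_cons]
    · have hkb : (k == fn) = false := beq_eq_false_iff_ne.mpr hk
      by_cases ho : k = other
      · subst ho
        have hc : (pvCanon k == target) = true := by rw [h k hk]; simp
        simp [pvScanLoop, hkb, hc, PySem.Dict.get?_mk_cons, pvScanLoop_found]
      · have hob : (k == other) = false := beq_eq_false_iff_ne.mpr ho
        have hc : (pvCanon k == target) = false := by rw [h k hk]; exact hob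
        simp [pvScanLoop, hkb, hc, PySem.Dict.get?_mk_cons, hob, ih]

-- the alias loop of A, evaluated over the constant 2-entry table
lemma pvAliasLoop_eval (fm : List (String × List (String × String))) (fn : String) :
    pvAliasLoop fm fn FIELD_NAME_ALIASES.items =
      if fn == "components" && (PySem.Dict.mk fm).contains "component/s" then
        (PySem.Dict.mk fm).get? "component/s"
      else if fn == "affects_versions" && (PySem.Dict.mk fm).contains "affects_version/s" then
        (PySem.Dict.mk fm).get? "affects_version/s"
      else none := by
  show pvAliasLoop fm fn
      [("component/s", "components"), ("affects_version/s", "affects_versions")] = _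
  simp [pvAliasLoop]

lemma pvForward_eval (fn : String) :
    FIELD_NAME_ALIASES.get? fn =
      if fn = "component/s" then some "components"
      else if fn = "affects_version/s" then some "affects_versions" else none := by
  by_cases h1 : fn = "component/s"
  · subst h1; rfl
  by_cases h2 : fn = "affects_version/s"
  · subst h2; rfl
  have b1 : ("component/s" == fn) = false := beq_eq_false_iff_ne.mpr (Ne.symm h1)
  have b2 : ("affects_version/s" == fn) = false := beq_eq_false_iff_ne.mpr (Ne.symm h2)
  simp [FIELD_NAME_ALIASES, PySem.Dict.ofList, PySem.Dict.update, PySem.Dict.insert,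
    PySem.Dict.empty, b1, b2, h1, h2, PySem.Dict.get?]

-- ===== VERDICT =====
theorem get_field_with_alias_spec : Claim_equal_get_field_with_alias := by
  intro fm fn _
  unfold Spec_get_field_with_alias get_field_with_alias get_field_with_alias_alt
  have hct : ∀ k, (PySem.Dict.mk fm).contains k = ((PySem.Dict.mk fm).get? k).isSome :=
    fun k => PySem.Dict.contains_eq_isSome_get? _ _
  rw [pvAliasLoop_eval, pvForward_eval]
  by_cases h1 : fn = "components"
  · subst h1
    rw [pvScanLoop_eq _ _ "component/s"
      (by intro k hk
          rw [pvCanon_eq, pvCanon_eq]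
          split_ifs with a b <;> simp_all)]
    cases hA : (PySem.Dict.mk fm).get? "components" <;>
      cases hB : (PySem.Dict.mk fm).get? "component/s" <;> simp [hA, hB, hct]
  by_cases h2 : fn = "affects_versions"
  · subst h2
    rw [pvScanLoop_eq _ _ "affects_version/s"
      (by intro k hk
          rw [pvCanon_eq, pvCanon_eq]
          split_ifs with a b <;> simp_all)]
    cases hA : (PySem.Dict.mk fm).get? "affects_versions" <;>
      cases hB : (PySem.Dict.mk fm).get? "affects_version/s" <;> simp [hA, hB, hct]
  by_cases h3 : fn = "component/s"
  · subst h3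
    rw [pvScanLoop_eq _ _ "components"
      (by intro k hk
          rw [pvCanon_eq, pvCanon_eq]
          split_ifs with a b <;> simp_all)]
    cases hA : (PySem.Dict.mk fm).get? "component/s" <;>
      cases hB : (PySem.Dict.mk fm).get? "components" <;> simp [hA, hB, hct]
  by_cases h4 : fn = "affects_version/s"
  · subst h4
    rw [pvScanLoop_eq _ _ "affects_versions"
      (by intro k hk
          rw [pvCanon_eq, pvCanon_eq]
          split_ifs with a b <;> simp_all)]
    cases hA : (PySem.Dict.mk fm).get? "affects_version/s" <;>
      cases hB : (PySem.Dict.mk fm).get? "affects_versions" <;> simp [hA, hB, hct]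
  -- generic name: fallback key is fn itself (the alias-equivalent set is empty)
  · rw [pvScanLoop_eq fn _ fn
      (by intro k hk
          rw [pvCanon_eq, pvCanon_eq]
          split_ifs with a b <;> simp_all <;>
            first
            | (intro e; exact h3 e.symm)
            | (intro e; exact h4 e.symm))]
    have bn1 : (fn == "components") = false := beq_eq_false_iff_ne.mpr h1
    have bn2 : (fn == "affects_versions") = false := beq_eq_false_iff_ne.mpr h2
    simp only [bn1, bn2, h3, h4]
    cases hA : (PySem.Dict.mk fm).get? fn <;> simp [hA, hct]
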